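-- pv_equiv track=rewrite | github.com/mhxie/reflectl | scripts/lint.py | _has_inline_explanation
-- ===== SOURCE A (Python) =====
-- def _has_inline_explanation(text: str, term: str, window: int = 80) -> bool:
--     """Heuristic: does *term* appear within *window* characters before
--     an opening parenthesis that likely contains a definition?
--
--     Examples that pass:
--         "SIMD (Single Instruction, Multiple Data)"
--         "OCC (optimistic concurrency control)"
--     """
--     idx = 0
--     term_lower = term.lower()
--     text_lower = text.lower()
--     while True:
--         pos = text_lower.find(term_lower, idx)
--         if pos == -1:
--             return False
--         after = text[pos + len(term): pos + len(term) + window]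
--         # Look for " (" pattern near the term
--         paren_pos = after.find("(")
--         if paren_pos != -1 and paren_pos < 40:
--             return True
--         idx = pos + 1
-- ===== SOURCE B (Python) =====
-- def _has_inline_explanation(text: str, term: str, window: int = 80) -> bool:
--     """Scan parenthesis anchors and look backward for the term."""
--     reach = min(40, window)  # term's end must lie within this many chars before '('
--     if reach <= 0:
--         return False
--     text_lower = text.lower()
--     term_lower = term.lower()
--     back = len(term) + reach - 1
--     for p, ch in enumerate(text):
--         if ch == "(":
--             lo = p - back
--             if lo < 0:
--                 lo = 0
--             if term_lower in text_lower[lo:p]: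
--                 return True
--     return False
-- ===== Notes on version B (the rewrite author's own statement) =====
-- stated objective: alternative
-- what changed: B inverts A's scan: instead of walking over term occurrences and looking forward for the first '(', B walks over '(' anchors in the text and tests whether the lowered term occurs in the bounded backward slice before each one.
-- outside the precondition, e.g. on _has_inline_explanation('a)  (ax(\t x\t))(a\tA) ', '', -2): A returns True, B returns False
import Mathlib
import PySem

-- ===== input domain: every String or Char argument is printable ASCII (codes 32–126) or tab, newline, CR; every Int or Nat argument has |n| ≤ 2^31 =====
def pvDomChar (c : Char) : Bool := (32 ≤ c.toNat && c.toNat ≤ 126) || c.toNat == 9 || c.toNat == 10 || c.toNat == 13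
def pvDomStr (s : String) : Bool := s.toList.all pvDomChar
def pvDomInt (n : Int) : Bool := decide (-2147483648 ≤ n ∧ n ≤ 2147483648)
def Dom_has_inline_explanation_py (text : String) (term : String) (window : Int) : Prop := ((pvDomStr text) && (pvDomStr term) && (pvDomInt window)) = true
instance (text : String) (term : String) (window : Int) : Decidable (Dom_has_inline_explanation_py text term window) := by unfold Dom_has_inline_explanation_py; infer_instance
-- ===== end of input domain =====

-- B inverts A's scan: it walks over '(' anchors and looks backward for the term instead of
-- walking over term occurrences and looking forward for a '(' (objective: alternative decomposition).

-- ===== PORT A =====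
-- termination helper for A's while-loop: a successful find(sub, idx) lands in [idx, len]
theorem pvFindFromBounds (s sub : List Char) (k : Nat)
    (h : PySem.Chars.findFrom s sub (k : Int) none ≠ -1) :
    k ≤ (PySem.Chars.findFrom s sub (k : Int) none).toNat ∧
      (PySem.Chars.findFrom s sub (k : Int) none).toNat ≤ s.length := by
  by_cases hk : k ≤ s.length
  · obtain ⟨h1, h2, -⟩ := PySem.Chars.findFrom_natCast_spec s sub k hk h
    have h3 := PySem.Chars.find_le_length (List.drop k s) sub
    constructor
    · omega
    · -- findFrom unfolds to k + find (drop k s)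
      have := PySem.Chars.findFrom_natCast s sub k hk
      rw [this] at h ⊢
      split_ifs at h ⊢ with hf
      · omega
      · have h0 : (0:Int) ≤ PySem.Chars.find (List.drop k s) sub := by
          have := PySem.Chars.neg_one_le_find (List.drop k s) sub
          omega
        simp only [List.length_drop] at h3
        omega
  · exfalso
    apply h
    simp only [PySem.Chars.findFrom]
    have : (s.length : Int) < (k : Int) := by exact_mod_cast Nat.lt_of_not_le hk
    split_ifs with h1 <;> simp_all <;> omega

-- A's while-loop (idx strictly increases towards len+1)
def pvHieLoopA (text text_lower term_lower : List Char) (termLen : Nat) (window : Int)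
    (idx : Nat) : Bool :=
  let pos := PySem.Chars.findFrom text_lower term_lower (idx : Int) none
  if hpos : pos = -1 then false
  else
    let after := PySem.List.slice text (some (pos + termLen)) (some (pos + termLen + window))
    let paren_pos := PySem.Chars.find after ['(']
    if paren_pos ≠ -1 ∧ paren_pos < 40 then true
    else pvHieLoopA text text_lower term_lower termLen window (pos.toNat + 1)
termination_by text_lower.length + 1 - idx
decreasing_by
  have := pvFindFromBounds text_lower term_lower idx hpos
  omega

def has_inline_explanation_py (text : String) (term : String) (window : Int) : Bool :=
  let term_lower := PySem.Chars.lower term.toList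
  let text_lower := PySem.Chars.lower text.toList
  pvHieLoopA text.toList text_lower term_lower term.toList.length window 0

-- ===== PORT B =====
-- B's for-loop over enumerate(text)
def pvHieLoopB (text_lower term_lower : List Char) (back : Int) : List (Int × Char) → Bool
  | [] => false
  | (p, ch) :: rest =>
    if ch = '(' then
      let lo0 : Int := p - back
      let lo : Int := if lo0 < 0 then 0 else lo0
      if PySem.Chars.isIn term_lower (PySem.List.slice text_lower (some lo) (some p)) then true
      else pvHieLoopB text_lower term_lower back rest
    else pvHieLoopB text_lower term_lower back rest

def has_inline_explanation_py_alt (text : String) (term : String) (window : Int) : Bool :=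
  let reach := min 40 window
  if reach ≤ 0 then false
  else
    let text_lower := PySem.Chars.lower text.toList
    let term_lower := PySem.Chars.lower term.toList
    let back : Int := (term.toList.length : Int) + reach - 1
    pvHieLoopB text_lower term_lower back (PySem.List.enumerate text.toList 0)

-- ===== PRECONDITION & SPEC =====
-- Pre_ restricts to nonnegative windows — the function's natural domain (window is a character
-- count); for window < 0 Python's slice arithmetic makes A's look-ahead window wrap to the end
-- of the text, an accident of A's implementation that B does not reproduce.
def Pre_has_inline_explanation_py (text : String) (term : String) (window : Int) : Prop :=
  0 ≤ window
instance (text : String) (term : String) (window : Int) : Decidable (Pre_has_inline_explanation_py text term window) := by unfold Pre_has_inline_explanation_py; infer_instance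

def pvWitness_has_inline_explanation_py : String × String × Int :=
  ("SIMD (Single Instruction, Multiple Data)", "simd", 80)

def Spec_has_inline_explanation_py (text : String) (term : String) (window : Int) (out : Bool) : Prop := out = has_inline_explanation_py_alt text term window
instance (text : String) (term : String) (window : Int) (out : Bool) : Decidable (Spec_has_inline_explanation_py text term window out) := by unfold Spec_has_inline_explanation_py; infer_instance

-- ===== CLAIM (what is proved, stated in full; the proofs are below) =====
def Claim_equal_has_inline_explanation_py : Prop := ∀ (text : String) (term : String) (window : Int), Dom_has_inline_explanation_py text term window → Pre_has_inline_explanation_py text term window → Spec_has_inline_explanation_py text term window (has_inline_explanation_py text term window)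

-- ===== LEMMAS AND PROOFS =====

-- `occ tl sl pos`: the (lowered) term occurs in the lowered text at position pos
def pvOcc (tl sl : List Char) (pos : Nat) : Prop := sl <+: tl.drop pos
-- `hit txt L m pos`: some '(' sits at offset < m after the end of the occurrence at pos
def pvHit (txt : List Char) (L m pos : Nat) : Prop := ∃ j < m, txt[pos + L + j]? = some '('
-- the common characterisation both programs decide
def pvQ (txt tl sl : List Char) (L m : Nat) : Prop := ∃ pos, pvOcc tl sl pos ∧ pvHit txt L m pos

theorem pvSingletonPrefix (c : Char) (l : List Char) : [c] <+: l ↔ l[0]? = some c := by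
  cases l with
  | nil => simp
  | cons x t => simp [List.cons_prefix_cons]; exact eq_comm

-- first '(' in `after` is at index < 40  ↔  some '(' is at index < 40
theorem pvParenCond (after : List Char) :
    (PySem.Chars.find after ['('] ≠ -1 ∧ PySem.Chars.find after ['('] < 40) ↔
      ∃ j < 40, after[j]? = some '(' := by
  constructor
  · rintro ⟨h1, h2⟩
    have h0 : 0 ≤ PySem.Chars.find after ['('] := by
      rw [PySem.Chars.find_nonneg_iff]
      rw [← PySem.Chars.find_ne_neg_one_iff]; exact h1
    obtain ⟨hp, -⟩ := PySem.Chars.find_spec h0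
    refine ⟨(PySem.Chars.find after ['(']).toNat, by omega, ?_⟩
    rw [pvSingletonPrefix] at hp
    rw [List.getElem?_drop] at hp
    simpa using hp
  · rintro ⟨j, hj, hget⟩
    have hpfx : ['('] <+: after.drop j := by
      rw [pvSingletonPrefix, List.getElem?_drop]; simpa using hget
    have hinf : ['('] <:+: after := by
      exact (hpfx.isInfix).trans (List.drop_suffix j after).isInfix
    have h1 : PySem.Chars.find after ['('] ≠ -1 := by
      rw [PySem.Chars.find_ne_neg_one_iff]; exact hinf
    refine ⟨h1, ?_⟩
    have h0 : 0 ≤ PySem.Chars.find after ['('] := by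
      rw [PySem.Chars.find_nonneg_iff]; exact hinf
    obtain ⟨-, hmin⟩ := PySem.Chars.find_spec h0
    by_contra hge
    have : j < (PySem.Chars.find after ['(']).toNat := by omega
    exact hmin j this hpfx

-- A's window test at an occurrence pos (pos + L ≤ len text) equals pvHit with m = min 40 window
theorem pvClampIdx (n : Nat) (i : Int) (h : 0 ≤ i) :
    PySem.List.clampIdx n i = min i.toNat n := by
  unfold PySem.List.clampIdx
  rw [if_neg (by omega)]

theorem pvAfterCond (txt : List Char) (L : Nat) (posI : Int) (window : Int) (hw : 0 ≤ window)
    (h0 : 0 ≤ posI) (hpl : posI.toNat + L ≤ txt.length) :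
    ((∃ j < 40, (PySem.List.slice txt (some (posI + L)) (some (posI + L + window)))[j]? = some '(')
      ↔ pvHit txt L (min 40 window.toNat) posI.toNat) := by
  unfold pvHit
  have hslice : PySem.List.slice txt (some (posI + L)) (some (posI + L + window))
      = (txt.drop (posI.toNat + L)).take (min (posI + L + window).toNat txt.length - (posI.toNat + L)) := by
    simp only [PySem.List.slice, pvClampIdx _ _ (by omega : (0:Int) ≤ posI + L),
      pvClampIdx _ _ (by omega : (0:Int) ≤ posI + L + window)]
    congr 1
    · omega
    · congr 1
      omega
  rw [hslice]
  constructor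
  · rintro ⟨j, hj, hget⟩
    rw [List.getElem?_take] at hget
    split_ifs at hget with hjlt
    rw [List.getElem?_drop] at hget
    refine ⟨j, ?_, hget⟩
    omega
  · rintro ⟨j, hj, hget⟩
    have hin : posI.toNat + L + j < txt.length := by
      by_contra hc
      rw [List.getElem?_eq_none (by omega)] at hget
      exact absurd hget (by simp)
    refine ⟨j, by omega, ?_⟩
    rw [List.getElem?_take, if_pos (by omega), List.getElem?_drop]
    exact hget

-- the lowered term occurs in tl[lo:p]  ↔  an occurrence ends in the back-window (lo, p]
theorem pvBackSlice (tl sl : List Char) (lo p : Nat) (hp : p ≤ tl.length) (hlop : lo ≤ p) :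
    (PySem.Chars.isIn sl (PySem.List.slice tl (some (lo : Int)) (some (p : Int))) = true ↔
      ∃ pos, lo ≤ pos ∧ pos + sl.length ≤ p ∧ pvOcc tl sl pos) := by
  have hslice : PySem.List.slice tl (some (lo : Int)) (some (p : Int))
      = (tl.drop lo).take (p - lo) := by
    simp only [PySem.List.slice, pvClampIdx _ _ (by omega : (0:Int) ≤ (lo : Int)),
      pvClampIdx _ _ (by omega : (0:Int) ≤ (p : Int))]
    congr 2 <;> omega
  rw [hslice, ← PySem.Chars.exists_prefix_drop_iff_isIn]
  rcases List.eq_nil_or_concat sl with hnil | hne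
  · subst hnil
    simp only [List.nil_prefix, exists_const, List.length_nil, Nat.add_zero, pvOcc,
      List.nil_prefix, and_true, true_iff]
    exact ⟨lo, le_refl lo, hlop⟩
  · have hL : 1 ≤ sl.length := by
      obtain ⟨ys, y, rfl⟩ := hne; simp
    constructor
    · rintro ⟨d, hd⟩
      rw [List.drop_take, List.drop_drop, List.prefix_take_iff] at hd
      refine ⟨lo + d, by omega, by omega, hd.1⟩
    · rintro ⟨pos, hlo, hpl2, hocc⟩
      refine ⟨pos - lo, ?_⟩
      rw [List.drop_take, List.drop_drop, List.prefix_take_iff]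
      have hmin : lo + (pos - lo) = pos := by omega
      rw [hmin]
      exact ⟨hocc, by omega⟩

-- A raises nothing; extend find bounds with nonnegativity for rewriting pos = ↑pos.toNat
theorem pvFindFromNonneg (s sub : List Char) (k : Nat)
    (h : PySem.Chars.findFrom s sub (k : Int) none ≠ -1) :
    0 ≤ PySem.Chars.findFrom s sub (k : Int) none := by
  have hb := pvFindFromBounds s sub k h
  by_cases hk : k ≤ s.length
  · exact le_trans (by positivity) (PySem.Chars.findFrom_natCast_spec s sub k hk h).1
  · exfalso
    exact absurd (le_trans hb.1 hb.2) hk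

-- ===== A side: the loop decides pvQ from idx upwards =====
theorem pvLoopA_iff (txt tl sl : List Char) (L : Nat) (window : Int) (hw : 0 ≤ window)
    (hlen : tl.length = txt.length) (hsl : sl.length = L) (idx : Nat) :
    pvHieLoopA txt tl sl L window idx = true ↔
      ∃ pos, idx ≤ pos ∧ pvOcc tl sl pos ∧ pvHit txt L (min 40 window.toNat) pos := by
  induction idx using pvHieLoopA.induct txt tl sl L window with
  | case1 idx pos hpos =>
    rw [pvHieLoopA, dif_pos hpos]
    simp only [Bool.false_eq_true, false_iff]
    rintro ⟨pos', hge, hocc, j, hj, hget⟩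
    by_cases hk : idx ≤ tl.length
    · apply (PySem.Chars.findFrom_natCast_eq_neg_one_iff tl sl idx hk).mp hpos
      have hdrop : tl.drop pos' = (tl.drop idx).drop (pos' - idx) := by
        rw [List.drop_drop]; congr 1; omega
      rw [pvOcc, hdrop] at hocc
      exact hocc.isInfix.trans (List.drop_suffix _ _).isInfix
    · obtain ⟨hlt, -⟩ := List.getElem?_eq_some_iff.mp hget
      omega
  | case2 idx pos hpos after paren_pos hcond =>
    rw [pvHieLoopA, dif_neg hpos, if_pos hcond]
    simp only [true_iff]
    have h0 : 0 ≤ pos := pvFindFromNonneg tl sl idx hpos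
    have hb := pvFindFromBounds tl sl idx hpos
    have hk : idx ≤ tl.length := le_trans hb.1 hb.2
    obtain ⟨-, hocc, -⟩ := PySem.Chars.findFrom_natCast_spec tl sl idx hk hpos
    have hpl : pos.toNat + L ≤ txt.length := by
      have := hocc.length_le
      simp only [List.length_drop] at this
      omega
    exact ⟨pos.toNat, hb.1, hocc,
      (pvAfterCond txt L pos window hw h0 hpl).mp ((pvParenCond after).mp hcond)⟩
  | case3 idx pos hpos after paren_pos hcond ih =>
    rw [pvHieLoopA, dif_neg hpos, if_neg hcond, ih]
    have h0 : 0 ≤ pos := pvFindFromNonneg tl sl idx hpos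
    have hb := pvFindFromBounds tl sl idx hpos
    have hk : idx ≤ tl.length := le_trans hb.1 hb.2
    obtain ⟨-, hocc, hmin⟩ := PySem.Chars.findFrom_natCast_spec tl sl idx hk hpos
    have hpl : pos.toNat + L ≤ txt.length := by
      have := hocc.length_le
      simp only [List.length_drop] at this
      omega
    have hnot : ¬ pvHit txt L (min 40 window.toNat) pos.toNat := fun hh =>
      hcond ((pvParenCond after).mpr ((pvAfterCond txt L pos window hw h0 hpl).mpr hh))
    constructor
    · rintro ⟨q, hq, ho, hh⟩
      exact ⟨q, by omega, ho, hh⟩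
    · rintro ⟨q, hq, ho, hh⟩
      rcases lt_trichotomy q pos.toNat with hlt | heq | hgt
      · exact absurd ho (hmin q hq hlt)
      · subst heq
        exact absurd hh hnot
      · exact ⟨q, by omega, ho, hh⟩

-- ===== B side: the loop over enumerate decides pvQ =====
theorem pvLoopB_any (tl sl : List Char) (back : Int) (l : List (Int × Char)) :
    pvHieLoopB tl sl back l = true ↔
      ∃ pc ∈ l, pc.2 = '(' ∧
        PySem.Chars.isIn sl (PySem.List.slice tl
          (some (if pc.1 - back < 0 then 0 else pc.1 - back)) (some pc.1)) = true := by
  induction l with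
  | nil => simp [pvHieLoopB]
  | cons pc rest ih =>
    obtain ⟨p, ch⟩ := pc
    rw [pvHieLoopB]
    by_cases hch : ch = '('
    · rw [if_pos hch]
      by_cases hin : PySem.Chars.isIn sl (PySem.List.slice tl
          (some (if p - back < 0 then 0 else p - back)) (some p)) = true
      · rw [if_pos hin]
        simp only [true_iff]
        exact ⟨(p, ch), List.mem_cons_self, hch, hin⟩
      · rw [if_neg hin, ih]
        constructor
        · rintro ⟨pc, hm, h1, h2⟩
          exact ⟨pc, List.mem_cons_of_mem _ hm, h1, h2⟩
        · rintro ⟨pc, hm, h1, h2⟩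
          rcases List.mem_cons.mp hm with heq | hm'
          · subst heq; exact absurd h2 hin
          · exact ⟨pc, hm', h1, h2⟩
    · rw [if_neg hch, ih]
      constructor
      · rintro ⟨pc, hm, h1, h2⟩
        exact ⟨pc, List.mem_cons_of_mem _ hm, h1, h2⟩
      · rintro ⟨pc, hm, h1, h2⟩
        rcases List.mem_cons.mp hm with heq | hm'
        · subst heq; exact absurd h1 hch
        · exact ⟨pc, hm', h1, h2⟩

theorem pvLoopB_iff (txt tl sl : List Char) (back : Int) (L m : Nat)
    (hlen : tl.length = txt.length) (hsl : sl.length = L)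
    (hm : 1 ≤ m) (hback : back = (L : Int) + m - 1) :
    pvHieLoopB tl sl back (PySem.List.enumerate txt 0) = true ↔
      pvQ txt tl sl L m := by
  rw [pvLoopB_any]
  unfold pvQ pvHit
  constructor
  · rintro ⟨pc, hm', h1, h2⟩
    obtain ⟨k, hk, rfl⟩ := (PySem.List.mem_enumerate_iff txt 0 pc).mp hm'
    simp only [Int.zero_add] at h1 h2
    -- the backward bound as a Nat
    have hloeq : (if (k : Int) - back < 0 then 0 else (k : Int) - back) = ((k - (L + m - 1) : Nat) : Int) := by
      split_ifs <;> omega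
    rw [hloeq] at h2
    obtain ⟨pos, hlo, hple, hocc⟩ :=
      (pvBackSlice tl sl (k - (L + m - 1)) k (by omega) (by omega)).mp h2
    rw [hsl] at hple
    refine ⟨pos, hocc, k - (pos + L), by omega, ?_⟩
    have : pos + L + (k - (pos + L)) = k := by omega
    rw [this, List.getElem?_eq_getElem (by omega), h1]
  · rintro ⟨pos, hocc, j, hj, hget⟩
    obtain ⟨hklt, hkch⟩ := List.getElem?_eq_some_iff.mp hget
    refine ⟨(((pos + L + j : Nat) : Int), '('), ?_, rfl, ?_⟩
    · rw [PySem.List.mem_enumerate_iff]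
      exact ⟨pos + L + j, hklt, by rw [hkch]; simp⟩
    · have hloeq : (if ((pos + L + j : Nat) : Int) - back < 0 then 0 else ((pos + L + j : Nat) : Int) - back)
          = ((pos + L + j - (L + m - 1) : Nat) : Int) := by
        split_ifs <;> omega
      simp only [hloeq]
      apply (pvBackSlice tl sl (pos + L + j - (L + m - 1)) (pos + L + j) (by omega) (by omega)).mpr
      exact ⟨pos, by omega, by omega, hocc⟩

-- ===== VERDICT (by name: the statement is the Claim_ definition above) =====
theorem has_inline_explanation_py_spec : Claim_equal_has_inline_explanation_py := by
  intro text term window _ hpre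
  unfold Pre_has_inline_explanation_py at hpre
  unfold Spec_has_inline_explanation_py has_inline_explanation_py has_inline_explanation_py_alt
  have hlen : (PySem.Chars.lower text.toList).length = text.toList.length := by
    simp [PySem.Chars.lower]
  have hsl : (PySem.Chars.lower term.toList).length = term.toList.length := by
    simp [PySem.Chars.lower]
  rw [Bool.eq_iff_iff]
  rw [pvLoopA_iff text.toList (PySem.Chars.lower text.toList) (PySem.Chars.lower term.toList)
    term.toList.length window hpre hlen hsl 0]
  by_cases hr : min (40 : Int) window ≤ 0
  · rw [if_pos hr]
    have hm0 : min 40 window.toNat = 0 := by omega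
    simp only [hm0, Bool.false_eq_true, iff_false]
    rintro ⟨pos, -, -, j, hj, -⟩
    omega
  · rw [if_neg hr]
    rw [pvLoopB_iff text.toList (PySem.Chars.lower text.toList) (PySem.Chars.lower term.toList)
      ((term.toList.length : Int) + min 40 window - 1) term.toList.length (min 40 window.toNat)
      hlen hsl (by omega) (by omega)]
    unfold pvQ
    constructor
    · rintro ⟨pos, -, h⟩
      exact ⟨pos, h⟩
    · rintro ⟨pos, h⟩
      exact ⟨pos, Nat.zero_le _, h⟩
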